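-- pv_equiv track=rewrite | github.com/MOSEMBIK/MonkeTrad | MonkeTrad.py | ABC2Monke
-- ===== SOURCE A (Python) =====
-- def ABC2Monke(txt: str) -> str:
--     '''
--     Just a simple function that encode from human latin ABC
--     to Reims' DUT Info 2020's Monke Language.
--
--     Disclamer :
--             This code is not based on science. It
--             dosen't make you able to speak the
--             monkey's language.
--     '''
--
--     Txt = txt.lower()
--     Monke = ""
--     abc = [" ", "a", "b", "c", "d", "e", "f", "g", "h", "i", "j", "k", "l", "m", "n", "o", "p", "q", "r", "s", "t", "u", "v", "w", "x", "y", "z"]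
--     Mabc = [" ", "O", "Oh", "U", "H", "Ou", "Hi", "I", "A", "Ha", "Ho", "Uh", "Hu", "Hou", "Ah", "Houhi", "Haha", "Oug", "Houg", "Ag", "Hiha", "Hoho", "Hihahou", "Hahouhi", "Houghi", "Haaaa", "Hiiiho"]
--     symb = ["?", ",", ".", "'", "!", "/", ";", ":", "&", "@", "#", "(", ")", "_", "\"", "\\", "*"]
--     nmbrs = ["0", "1", "2", "3", "4", "5", "6", "7", "8", "9"]
--
--     for i in range(len(Txt)):
--
--         #test for symbols and nubers
--         for nb in range(len(nmbrs)):
--             if txt[i] == nmbrs[nb]: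
--                 Monke = Monke + nmbrs[nb]
--
--         for k in range(len(symb)):
--             if txt[i] == symb[k]:
--                 Monke = Monke + symb[k]
--
--         for j in range(len(abc)):
--             if txt[i] == abc[j]:
--                 Monke = Monke + Mabc[j]
--
--     return Monke
-- ===== SOURCE B (Python) =====
-- MABC = [" ", "O", "Oh", "U", "H", "Ou", "Hi", "I", "A", "Ha", "Ho", "Uh", "Hu", "Hou", "Ah", "Houhi", "Haha", "Oug", "Houg", "Ag", "Hiha", "Hoho", "Hihahou", "Hahouhi", "Houghi", "Haaaa", "Hiiiho"]
-- SYMB = set("?,.'!/;:&@#()_\"\\*")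
--
-- def ABC2Monke(txt: str) -> str:
--     out = []
--     for ch in txt:
--         if '0' <= ch <= '9' or ch in SYMB:
--             out.append(ch)
--         elif ch == ' ' or 'a' <= ch <= 'z':
--             out.append(MABC[0 if ch == ' ' else ord(ch) - 96])
--         # every other character (uppercase, control, etc.) contributes nothing
--     return ''.join(out)
-- ===== Notes on version B (the rewrite author's own statement) =====
-- stated objective: alternative
-- what changed: B classifies each character arithmetically (digit/symbol pass through; lowercase letters index the Monke table directly by ord(ch)-96, space is index 0) instead of A's three linear table scans per character, and accumulates output pieces in a list joined once.
import Mathlib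
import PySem

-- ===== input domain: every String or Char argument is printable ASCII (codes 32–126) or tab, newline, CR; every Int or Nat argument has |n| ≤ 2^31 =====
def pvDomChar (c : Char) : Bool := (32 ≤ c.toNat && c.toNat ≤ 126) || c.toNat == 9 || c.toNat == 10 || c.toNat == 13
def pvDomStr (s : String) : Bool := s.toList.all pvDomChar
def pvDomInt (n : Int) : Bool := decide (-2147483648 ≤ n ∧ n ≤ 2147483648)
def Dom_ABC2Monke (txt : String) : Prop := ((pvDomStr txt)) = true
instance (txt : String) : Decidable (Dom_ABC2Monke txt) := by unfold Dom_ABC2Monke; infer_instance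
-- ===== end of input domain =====

-- B replaces A's three inner table scans per character by arithmetic classification
-- (digits/symbols pass through, lowercase letters index the Monke table by ord-96).

-- ===== PORT A =====
def pvNmbrs : List Char := ['0','1','2','3','4','5','6','7','8','9']
def pvSymb : List Char := ['?', ',', '.', '\'', '!', '/', ';', ':', '&', '@', '#', '(', ')', '_', '"', '\\', '*']
def pvAbc : List Char := [' ','a','b','c','d','e','f','g','h','i','j','k','l','m','n','o','p','q','r','s','t','u','v','w','x','y','z']
def pvMabc : List (List Char) :=
  [" ".toList, "O".toList, "Oh".toList, "U".toList, "H".toList, "Ou".toList, "Hi".toList,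
   "I".toList, "A".toList, "Ha".toList, "Ho".toList, "Uh".toList, "Hu".toList, "Hou".toList,
   "Ah".toList, "Houhi".toList, "Haha".toList, "Oug".toList, "Houg".toList, "Ag".toList,
   "Hiha".toList, "Hoho".toList, "Hihahou".toList, "Hahouhi".toList, "Houghi".toList,
   "Haaaa".toList, "Hiiiho".toList]

-- the body of A's outer loop for one character c = txt[i]: the three inner scans in order
def pvStepA (c : Char) (Monke : List Char) : List Char :=
  (pvAbc.zip pvMabc).foldl (fun M p => if c = p.1 then M ++ p.2 else M)
    (pvSymb.foldl (fun M k => if c = k then M ++ [k] else M)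
      (pvNmbrs.foldl (fun M nb => if c = nb then M ++ [nb] else M) Monke))

-- index loop over range(len(Txt)) reading txt[i] (always in range: Chars.lower is
-- per-char, so the total pyGetD is exact here)
def ABC2MonkeCore (txt : List Char) : List Char :=
  (PySem.List.pyRange 0 ((PySem.Chars.lower txt).length : Int) 1).foldl
    (fun Monke i => pvStepA (PySem.List.pyGetD txt i ' ') Monke) []

def ABC2Monke (txt : String) : String := String.ofList (ABC2MonkeCore txt.toList)

-- ===== PORT B =====
def pvMabcB : List (List Char) :=
  [" ".toList, "O".toList, "Oh".toList, "U".toList, "H".toList, "Ou".toList, "Hi".toList,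
   "I".toList, "A".toList, "Ha".toList, "Ho".toList, "Uh".toList, "Hu".toList, "Hou".toList,
   "Ah".toList, "Houhi".toList, "Haha".toList, "Oug".toList, "Houg".toList, "Ag".toList,
   "Hiha".toList, "Hoho".toList, "Hihahou".toList, "Hahouhi".toList, "Houghi".toList,
   "Haaaa".toList, "Hiiiho".toList]
def pvSymbB : PySem.Set Char := PySem.Set.ofList "?,.'!/;:&@#()_\"\\*".toList

-- the body of Source B's loop for one character ch (class dispatch + computed index)
def pvStepB (ch : Char) : List Char :=
  if ('0' ≤ ch ∧ ch ≤ '9') ∨ ch ∈ pvSymbB then [ch]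
  else if ch = ' ' ∨ ('a' ≤ ch ∧ ch ≤ 'z') then
    pvMabcB.getD (if ch = ' ' then 0 else ch.toNat - 96) []
  else []

def ABC2Monke_alt (txt : String) : String :=
  String.ofList ((txt.toList.foldl (fun out ch => out ++ [pvStepB ch]) []).flatten)

-- ===== PRECONDITION & SPEC =====
def Spec_ABC2Monke (txt : String) (out : String) : Prop := out = ABC2Monke_alt txt
instance (txt : String) (out : String) : Decidable (Spec_ABC2Monke txt out) := by unfold Spec_ABC2Monke; infer_instance

-- ===== CLAIM =====
def Claim_equal_ABC2Monke : Prop := ∀ (txt : String), Dom_ABC2Monke txt → Spec_ABC2Monke txt (ABC2Monke txt)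

-- ===== LEMMAS AND PROOFS =====

-- what A appends for one character (closed form of the three inner scans)
def pvGA (c : Char) : List Char :=
  pvNmbrs.flatMap (fun nb => if c = nb then [nb] else []) ++
  pvSymb.flatMap (fun k => if c = k then [k] else []) ++
  (pvAbc.zip pvMabc).flatMap (fun p => if c = p.1 then p.2 else [])

theorem pv_fold_single (c : Char) (L : List Char) (M : List Char) :
    L.foldl (fun M x => if c = x then M ++ [x] else M) M
      = M ++ L.flatMap (fun x => if c = x then [x] else []) := by
  have h : L.foldl (fun M x => if c = x then M ++ [x] else M) M
      = L.foldl (fun M x => M ++ (if c = x then [x] else [])) M :=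
    PySem.List.foldl_congr_mem L _ _ M (by intro acc x _; split_ifs <;> simp)
  exact h.trans (PySem.List.foldl_append_eq_flatMap _ _ _)

theorem pv_fold_pairs (c : Char) (L : List (Char × List Char)) (M : List Char) :
    L.foldl (fun M p => if c = p.1 then M ++ p.2 else M) M
      = M ++ L.flatMap (fun p => if c = p.1 then p.2 else []) := by
  have h : L.foldl (fun M p => if c = p.1 then M ++ p.2 else M) M
      = L.foldl (fun M p => M ++ (if c = p.1 then p.2 else [])) M :=
    PySem.List.foldl_congr_mem L _ _ M (by intro acc p _; split_ifs <;> simp)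
  exact h.trans (PySem.List.foldl_append_eq_flatMap _ _ _)

theorem pv_step_eq (c : Char) (M : List Char) :
    pvStepA c M = M ++ pvGA c := by
  rw [pvStepA, pv_fold_single, pv_fold_single, pv_fold_pairs, pvGA]
  simp [List.append_assoc]

theorem pv_coreA_eq (l : List Char) : ABC2MonkeCore l = l.flatMap pvGA := by
  have h0 : ABC2MonkeCore l
      = (PySem.List.pyRange 0 (l.length : Int) 1).foldl
          (fun Monke i => pvStepA (PySem.List.pyGetD l i ' ') Monke) [] := by
    unfold ABC2MonkeCore
    rw [show (((PySem.Chars.lower l).length : Int)) = (l.length : Int) by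
      simp [PySem.Chars.lower]]
  have h1 : (PySem.List.pyRange 0 (l.length : Int) 1).foldl
        (fun Monke i => pvStepA (PySem.List.pyGetD l i ' ') Monke) []
      = l.foldl (fun M c => pvStepA c M) [] :=
    PySem.List.foldl_pyRange_zero_pyGetD' l ' ' (fun M c => pvStepA c M) []
  have h2 : l.foldl (fun M c => pvStepA c M) [] = l.foldl (fun M c => M ++ pvGA c) [] :=
    PySem.List.foldl_congr_mem l _ _ [] (by intro acc x _; exact pv_step_eq x acc)
  have h3 : l.foldl (fun M c => M ++ pvGA c) [] = [] ++ l.flatMap pvGA :=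
    PySem.List.foldl_append_eq_flatMap _ _ _
  simpa using ((h0.trans h1).trans h2).trans h3

-- B's accumulator loop flattened is a flatMap of the per-character step
theorem pv_coreB_eq (l : List Char) :
    (l.foldl (fun out ch => out ++ [pvStepB ch]) []).flatten
      = l.flatMap pvStepB := by
  rw [PySem.List.foldl_append_eq_flatMap, List.nil_append]
  induction l with
  | nil => rfl
  | cons c t ih => simp [List.flatMap_cons, ih]

set_option maxHeartbeats 4000000 in
set_option maxRecDepth 8192 in
theorem pv_char_eq_fin :
    ∀ n ∈ List.range 128, pvGA (Char.ofNat n) = pvStepB (Char.ofNat n) := by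
  decide

set_option maxRecDepth 100000 in
theorem pv_char_eq (c : Char) (h : pvDomChar c = true) :
    pvGA c = pvStepB c := by
  have hlt : c.toNat < 128 := by
    simp only [pvDomChar, Bool.or_eq_true, Bool.and_eq_true, decide_eq_true_eq,
      beq_iff_eq] at h
    omega
  have hc : c = Char.ofNat c.toNat := (Char.ofNat_toNat c).symm
  rw [hc]
  exact pv_char_eq_fin c.toNat (List.mem_range.mpr hlt)

theorem pv_flatMap_eq (l : List Char) (h : ∀ c ∈ l, pvDomChar c = true) :
    l.flatMap pvGA = l.flatMap pvStepB := by
  induction l with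
  | nil => simp only [List.flatMap_nil]
  | cons c t ih =>
    simp only [List.flatMap_cons]
    rw [pv_char_eq c (h c List.mem_cons_self),
      ih (fun x hx => h x (List.mem_cons_of_mem _ hx))]

-- ===== VERDICT =====
theorem ABC2Monke_spec : Claim_equal_ABC2Monke := by
  intro txt hDom
  unfold Spec_ABC2Monke ABC2Monke ABC2Monke_alt
  rw [pv_coreA_eq, pv_coreB_eq, pv_flatMap_eq]
  intro c hc
  unfold Dom_ABC2Monke pvDomStr at hDom
  exact (List.all_eq_true.mp hDom) c hc
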